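-- pv_equiv track=rewrite | github.com/bryant273092/Python-Projects | ile1materials/Lab 5/614955/exam.py | mutual_callers
-- ===== SOURCE A (Python) =====
-- def mutual_callers (db : {str:{str:[int]}}) -> {(str,str)}:
--     set_mutual = set()
--     for c, value in db.items():
--         for r, num in value.items():
--             for caller, v in db.items():
--                 if caller == r:
--                     if c in db[caller]:
--                         set_mutual.add(tuple(sorted((c, r))))
--
--     return set_mutual
-- ===== SOURCE B (Python) =====
-- def mutual_callers(db):
--     # one pass builds the flat edge list/set; a second pass over the edges
--     # finds the mutual pairs -- no nested rescans of db.
--     edges = [(c, r) for c, callees in db.items() for r in callees]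
--     edge_set = set(edges)
--     result = set()
--     for c, r in edges:
--         if (r, c) in edge_set:
--             result.add(tuple(sorted((c, r))))
--     return result
-- ===== Notes on version B (the rewrite author's own statement) =====
-- stated objective: faster
-- what changed: Replaced A's triple nested loop (which rescans all of db for each call edge) with one pass that builds the flat edge list and its set, followed by a single scan over the edges testing the reversed edge against the set.
import Mathlib
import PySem

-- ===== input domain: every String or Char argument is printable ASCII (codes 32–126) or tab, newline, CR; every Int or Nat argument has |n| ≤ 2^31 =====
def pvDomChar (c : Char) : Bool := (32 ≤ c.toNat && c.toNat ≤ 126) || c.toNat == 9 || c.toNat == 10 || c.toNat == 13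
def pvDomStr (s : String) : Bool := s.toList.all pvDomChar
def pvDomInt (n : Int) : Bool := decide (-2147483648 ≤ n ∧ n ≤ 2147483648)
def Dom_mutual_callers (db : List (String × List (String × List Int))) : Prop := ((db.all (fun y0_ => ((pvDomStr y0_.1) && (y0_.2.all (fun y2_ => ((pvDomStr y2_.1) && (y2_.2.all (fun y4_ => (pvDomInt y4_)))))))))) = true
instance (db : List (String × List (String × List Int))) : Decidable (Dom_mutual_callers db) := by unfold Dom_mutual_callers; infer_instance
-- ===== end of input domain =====

-- B replaces A's triple nested loop by one build pass over db producing the flat edge list/set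
-- plus one scan over the edges (objective: faster, no inner rescan of db per edge).

-- tuple(sorted((c, r))) for two strings (shared by both ports)
def pvSortPair (c r : String) : String × String := if r < c then (r, c) else (c, r)

-- ===== PORT A =====
def mutual_callers (db : List (String × List (String × List Int))) : List (String × String) :=
  db.foldl (fun set_mutual cv =>
    cv.2.foldl (fun set_mutual rv =>
      db.foldl (fun set_mutual callerv =>
        if callerv.1 == rv.1 then
          -- db[caller]: caller is a key of db, so get? never misses (KeyError unreachable)
          match PySem.Dict.get? (PySem.Dict.mk db) callerv.1 with
          | some inner =>
            if PySem.Dict.contains (PySem.Dict.mk inner) cv.1 then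
              PySem.Set.add set_mutual (pvSortPair cv.1 rv.1)
            else set_mutual
          | none => set_mutual
        else set_mutual) set_mutual) set_mutual) []

-- ===== PORT B =====
def mutual_callers_alt (db : List (String × List (String × List Int))) : List (String × String) :=
  let edges : List (String × String) :=
    db.foldl (fun acc cv => acc ++ cv.2.map (fun rv => (cv.1, rv.1))) []
  let edgeSet : PySem.Set (String × String) := PySem.Set.ofList edges
  edges.foldl (fun result e =>
    if PySem.Set.contains edgeSet (e.2, e.1) then
      PySem.Set.add result (pvSortPair e.1 e.2)
    else result) []

-- ===== PRECONDITION & SPEC =====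
-- Pre_ excludes association lists with duplicate outer or inner keys: they do not
-- represent Python dicts (a dict literal collapses duplicates), so A never sees them.
def Pre_mutual_callers (db : List (String × List (String × List Int))) : Prop :=
  (db.map Prod.fst).Nodup ∧ ∀ p ∈ db, (p.2.map Prod.fst).Nodup
instance (db : List (String × List (String × List Int))) : Decidable (Pre_mutual_callers db) := by unfold Pre_mutual_callers; infer_instance

def pvWitness_mutual_callers : (List (String × List (String × List Int))) :=
  [("f", [("g", [1, 2])]), ("g", [("f", [3])])]

def Spec_mutual_callers (db : List (String × List (String × List Int))) (out : List (String × String)) : Prop := out = mutual_callers_alt db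
instance (db : List (String × List (String × List Int))) (out : List (String × String)) : Decidable (Spec_mutual_callers db out) := by unfold Spec_mutual_callers; infer_instance

-- ===== CLAIM (what is proved, stated in full; the proofs are below) =====
def Claim_equal_mutual_callers : Prop := ∀ (db : List (String × List (String × List Int))), Dom_mutual_callers db → Pre_mutual_callers db → Spec_mutual_callers db (mutual_callers db)

-- ===== LEMMAS AND PROOFS =====

-- proof-only helpers
def pvEdges (db : List (String × List (String × List Int))) : List (String × String) :=
  db.flatMap (fun cv => cv.2.map (fun rv => (cv.1, rv.1)))

def pvCond (db : List (String × List (String × List Int))) (c r : String) : Bool :=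
  match PySem.Dict.get? (PySem.Dict.mk db) r with
  | some inner => PySem.Dict.contains (PySem.Dict.mk inner) c
  | none => false

def pvStep (db : List (String × List (String × List Int)))
    (s : List (String × String)) (e : String × String) : List (String × String) :=
  if pvCond db e.1 e.2 then PySem.Set.add s (pvSortPair e.1 e.2) else s

theorem pv_add_idem (s : List (String × String)) (x : String × String) :
    PySem.Set.add (PySem.Set.add s x) x = PySem.Set.add s x := by
  simp [PySem.Set.add]; split <;> simp_all

theorem pv_get?_isSome_any (l : List (String × List (String × List Int))) (k : String) :
    ((PySem.Dict.mk l).get? k).isSome = l.any (fun e => e.1 == k) := by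
  induction l with
  | nil => rfl
  | cons h t ih => rw [PySem.Dict.get?_mk_cons]; by_cases hk : h.1 == k <;> simp [hk, ih]

theorem pv_get?_some_iff (l : List (String × List (String × List Int)))
    (v : List (String × List Int)) (k : String) (hnd : (l.map Prod.fst).Nodup) :
    (PySem.Dict.mk l).get? k = some v ↔ (k, v) ∈ l := by
  rw [PySem.Dict.get?_eq_some_iff_mem_items]; simp [hnd, PySem.Dict.keys]

theorem pv_foldl_guard_idem (l : List (String × List (String × List Int))) (r : String)
    (t : List (String × String) → List (String × String)) (ht : ∀ s, t (t s) = t s)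
    (s : List (String × String)) :
    l.foldl (fun s e => if e.1 == r then t s else s) s
      = if l.any (fun e => e.1 == r) then t s else s := by
  induction l generalizing s with
  | nil => simp
  | cons h tl ih =>
    by_cases hk : (h.1 == r) = true
    · simp only [List.foldl_cons, List.any_cons, hk, if_true, Bool.true_or, ih]
      by_cases ha : tl.any (fun e => e.1 == r) <;> simp [ha, ht]
    · have hb : (h.1 == r) = false := by simpa using hk
      rw [List.foldl_cons, List.any_cons, hb, Bool.false_or]
      rw [if_neg (by simp : ¬ ((false : Bool) = true))]
      exact ih s

theorem pv_inner_eq_step (db : List (String × List (String × List Int))) (c r : String)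
    (s : List (String × String)) :
    db.foldl (fun s e =>
      if e.1 == r then
        match PySem.Dict.get? (PySem.Dict.mk db) e.1 with
        | some inner =>
          if PySem.Dict.contains (PySem.Dict.mk inner) c then
            PySem.Set.add s (pvSortPair c r)
          else s
        | none => s
      else s) s = pvStep db s (c, r) := by
  have hfun : (fun (s : List (String × String)) (e : String × List (String × List Int)) =>
      if e.1 == r then
        match PySem.Dict.get? (PySem.Dict.mk db) e.1 with
        | some inner =>
          if PySem.Dict.contains (PySem.Dict.mk inner) c then
            PySem.Set.add s (pvSortPair c r)
          else s
        | none => s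
      else s)
      = (fun s e => if e.1 == r then
          (match PySem.Dict.get? (PySem.Dict.mk db) r with
           | some inner =>
             if PySem.Dict.contains (PySem.Dict.mk inner) c then
               PySem.Set.add s (pvSortPair c r)
             else s
           | none => s) else s) := by
    funext s e
    by_cases hk : e.1 == r
    · rw [eq_of_beq hk]
    · simp [hk]
  rw [hfun, pv_foldl_guard_idem]
  · cases hopt : PySem.Dict.get? (PySem.Dict.mk db) r with
    | none =>
      have : db.any (fun e => e.1 == r) = false := by
        rw [← pv_get?_isSome_any, hopt]; rfl
      simp [this, pvStep, pvCond, hopt]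
    | some inner =>
      have : db.any (fun e => e.1 == r) = true := by
        rw [← pv_get?_isSome_any, hopt]; rfl
      simp only [this, if_true, pvStep, pvCond, hopt]
  · intro s
    cases hopt : PySem.Dict.get? (PySem.Dict.mk db) r with
    | none => simp [hopt]
    | some inner =>
      simp only [hopt]
      split
      · exact pv_add_idem s _
      · rfl

theorem pv_foldl_flatMap {a s : Type} (f : a → List (String × String))
    (g : s → (String × String) → s) (l : List a) (init : s) :
    (l.flatMap f).foldl g init = l.foldl (fun acc x => (f x).foldl g acc) init := by
  induction l generalizing init with
  | nil => rfl
  | cons h t ih => simp [List.flatMap_cons, List.foldl_append, ih]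

theorem pv_A_eq (db : List (String × List (String × List Int))) :
    mutual_callers db = (pvEdges db).foldl (pvStep db) [] := by
  unfold mutual_callers pvEdges
  rw [pv_foldl_flatMap]
  congr 1
  funext s cv
  rw [List.foldl_map]
  congr 1
  funext s rv
  exact pv_inner_eq_step db cv.1 rv.1 s

theorem pv_edges_foldl (db : List (String × List (String × List Int))) :
    db.foldl (fun acc cv => acc ++ cv.2.map (fun rv => (cv.1, rv.1))) ([] : List (String × String))
      = pvEdges db := by
  unfold pvEdges
  rw [PySem.List.foldl_append_eq_flatMap, List.nil_append]

theorem pv_edges_nodup (db : List (String × List (String × List Int)))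
    (h : Pre_mutual_callers db) : (pvEdges db).Nodup := by
  obtain ⟨h1, h2⟩ := h
  induction db with
  | nil => simp [pvEdges]
  | cons hd tl ih =>
    simp only [List.map_cons, List.nodup_cons] at h1
    simp only [pvEdges, List.flatMap_cons, List.nodup_append]
    refine ⟨?_, ih h1.2 (fun p hp => h2 p (List.mem_cons_of_mem _ hp)), ?_⟩
    · have hn : (hd.2.map Prod.fst).Nodup := h2 hd (List.mem_cons_self)
      have hinj : Function.Injective (fun n : String => (hd.1, n)) := by
        intro a b hab; simpa using congrArg Prod.snd hab
      have := hn.map hinj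
      rw [List.map_map] at this
      exact this
    · intro e he e' he'
      simp only [List.mem_map] at he
      obtain ⟨rv, -, rfl⟩ := he
      simp only [List.mem_flatMap, List.mem_map] at he'
      obtain ⟨cv, hcv, rv', -, rfl⟩ := he'
      intro heq
      have hfst : cv.1 = hd.1 := (congrArg Prod.fst heq).symm
      exact h1.1 (hfst ▸ List.mem_map_of_mem hcv)

theorem pv_contains_eq_cond (db : List (String × List (String × List Int)))
    (hnd : (db.map Prod.fst).Nodup) (c r : String) :
    (pvEdges db).contains (r, c) = pvCond db c r := by
  have hmem : (r, c) ∈ pvEdges db ↔ ∃ cv ∈ db, cv.1 = r ∧ ∃ a ∈ cv.2, a.1 = c := by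
    simp only [pvEdges, List.mem_flatMap, List.mem_map]
    constructor
    · rintro ⟨cv, hcv, rv, hrv, heq⟩
      rw [Prod.mk.injEq] at heq
      exact ⟨cv, hcv, heq.1, rv, hrv, heq.2⟩
    · rintro ⟨cv, hcv, hr, a, ha, hac⟩
      exact ⟨cv, hcv, a, ha, by rw [Prod.mk.injEq]; exact ⟨hr, hac⟩⟩
  cases hopt : PySem.Dict.get? (PySem.Dict.mk db) r with
  | none =>
    have hno : (r, c) ∉ pvEdges db := by
      rw [hmem]
      rintro ⟨cv, hcv, hr, -⟩
      have hs : (PySem.Dict.get? (PySem.Dict.mk db) r).isSome = true := by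
        rw [pv_get?_isSome_any]
        exact List.any_eq_true.mpr ⟨cv, hcv, by simp [hr]⟩
      rw [hopt] at hs; exact Bool.noConfusion hs
    simp [pvCond, hopt, hno]
  | some inner =>
    have hin : (r, inner) ∈ db := (pv_get?_some_iff db inner r hnd).mp hopt
    have hval : ((r, c) ∈ pvEdges db) ↔ ∃ a ∈ inner, a.1 = c := by
      rw [hmem]
      constructor
      · rintro ⟨cv, hcv, hr, a, ha, hac⟩
        have hcveq : cv.2 = inner := by
          have h1 : PySem.Dict.get? (PySem.Dict.mk db) r = some cv.2 :=
            (pv_get?_some_iff db cv.2 r hnd).mpr (by rw [← hr]; exact hcv)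
          rw [hopt] at h1; exact (Option.some.inj h1).symm
        exact ⟨a, hcveq ▸ ha, hac⟩
      · rintro ⟨a, ha, hac⟩
        exact ⟨(r, inner), hin, rfl, a, ha, hac⟩
    calc (pvEdges db).contains (r, c) = decide ((r, c) ∈ pvEdges db) := by simp
      _ = pvCond db c r := by
          simp only [pvCond, hopt, PySem.Dict.contains_eq_decide_mem_keys, PySem.Dict.keys]
          rw [decide_eq_decide]
          simp only [List.mem_map]
          exact hval

theorem pv_B_eq (db : List (String × List (String × List Int)))
    (h : Pre_mutual_callers db) :
    mutual_callers_alt db = (pvEdges db).foldl (pvStep db) [] := by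
  unfold mutual_callers_alt
  simp only [pv_edges_foldl]
  rw [PySem.Set.ofList_eq_self_of_nodup (pvEdges db) (pv_edges_nodup db h)]
  congr 1
  funext s e
  show (if PySem.Set.contains (pvEdges db) (e.2, e.1) then PySem.Set.add s (pvSortPair e.1 e.2) else s) = pvStep db s e
  have : PySem.Set.contains (pvEdges db) (e.2, e.1) = (pvEdges db).contains (e.2, e.1) := rfl
  rw [this, pv_contains_eq_cond db h.1 e.1 e.2]
  rfl

-- ===== VERDICT (by name: the statement is the Claim_ definition above) =====
theorem mutual_callers_spec : Claim_equal_mutual_callers := by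
  intro db _ hpre
  unfold Spec_mutual_callers
  rw [pv_A_eq, pv_B_eq db hpre]
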